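-- pv_equiv track=rewrite | github.com/kaluginpeter/Algorithms_and_structures_tasks | CodeWars/6kyu/Imperfect_Fibonacci_Rabbits.py | imperfect_fib_rabbits
-- ===== SOURCE A (Python) =====
-- def imperfect_fib_rabbits(n, b, l):
--     rabbits_by_age = [0] * (l)
--     rabbits_by_age[0] = 1
--
--     for month in range(n):
--         new_borns = 0
--
--         for age in range(1, l):
--             new_borns += rabbits_by_age[age] * b
--
--         for age in range(l - 1, 0, -1):
--             rabbits_by_age[age] = rabbits_by_age[age - 1]
--
--         rabbits_by_age[0] = new_borns
--     total_rabbits = sum(rabbits_by_age)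
--     return total_rabbits
-- ===== SOURCE B (Python) =====
-- def imperfect_fib_rabbits(n, b, l):
--     # Newborn-history formulation: born[t] is the cohort born at time t (padded so
--     # every needed past index exists); only a running total is updated each month.
--     born = [0] * (l - 1) + [1]
--     total = 1
--     for month in range(n):
--         new_borns = b * (total - born[-1])
--         total += new_borns - born[-l]
--         born.append(new_borns)
--     return total
-- ===== Notes on version B (the rewrite author's own statement) =====
-- stated objective: faster
-- what changed: B replaces A's per-month O(l) work (re-summing all adult buckets and shifting the whole age list) by an append-only newborn-history list with a running total, doing O(1) arithmetic per month via total += new_borns - born[-l].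
import Mathlib
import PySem

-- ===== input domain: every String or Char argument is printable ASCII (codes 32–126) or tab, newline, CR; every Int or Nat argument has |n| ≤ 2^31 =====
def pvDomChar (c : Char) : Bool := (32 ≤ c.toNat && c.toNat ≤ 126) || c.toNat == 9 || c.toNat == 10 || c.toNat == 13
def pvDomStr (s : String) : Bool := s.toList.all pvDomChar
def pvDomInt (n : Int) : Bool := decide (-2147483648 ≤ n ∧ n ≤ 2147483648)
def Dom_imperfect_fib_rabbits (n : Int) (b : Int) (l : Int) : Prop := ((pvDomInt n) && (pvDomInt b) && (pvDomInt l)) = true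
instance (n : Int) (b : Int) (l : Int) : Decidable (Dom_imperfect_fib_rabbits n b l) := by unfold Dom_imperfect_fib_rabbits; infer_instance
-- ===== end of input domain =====

-- B replaces the aged-bucket list (resummed and shifted every month) by a newborn-history
-- list with a running total, updating O(1) per month instead of O(l).

-- ===== PORT A =====
def imperfect_fib_rabbits (n : Int) (b : Int) (l : Int) : Int :=
  -- rabbits_by_age = [0] * l; rabbits_by_age[0] = 1   (index 0 in range under Pre_: l ≥ 1)
  let rba := PySem.List.pySetD (List.replicate l.toNat 0) 0 1
  let final := (PySem.List.pyRange 0 n 1).foldl (fun rba _month =>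
    -- new_borns = 0; for age in range(1, l): new_borns += rabbits_by_age[age] * b
    let new_borns := (PySem.List.pyRange 1 l 1).foldl
        (fun nb age => nb + (PySem.List.pyGetD rba age 0) * b) 0
    -- for age in range(l - 1, 0, -1): rabbits_by_age[age] = rabbits_by_age[age - 1]
    let rba := (PySem.List.pyRange (l - 1) 0 (-1)).foldl
        (fun r age => PySem.List.pySetD r age (PySem.List.pyGetD r (age - 1) 0)) rba
    -- rabbits_by_age[0] = new_borns
    PySem.List.pySetD rba 0 new_borns) rba
  final.sum

-- ===== PORT B =====
def imperfect_fib_rabbits_alt (n : Int) (b : Int) (l : Int) : Int :=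
  -- born = [0] * (l - 1) + [1]; total = 1
  let born := List.replicate (l - 1).toNat 0 ++ [1]
  let st := (PySem.List.pyRange 0 n 1).foldl (fun (st : List Int × Int) _month =>
    -- new_borns = b * (total - born[-1]); total += new_borns - born[-l]; born.append(new_borns)
    -- (indices -1 and -l are in range under Pre_: l ≥ 1 and len(born) ≥ l)
    let nb := b * (st.2 - PySem.List.pyGetD st.1 (-1) 0)
    (st.1 ++ [nb], st.2 + (nb - PySem.List.pyGetD st.1 (-l) 0))) (born, 1)
  st.2

-- ===== PRECONDITION & SPEC =====
-- Pre_ excludes l ≤ 0, on which A raises IndexError (rabbits_by_age[0] on an empty list).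
def Pre_imperfect_fib_rabbits (n : Int) (b : Int) (l : Int) : Prop := 1 ≤ l
instance (n : Int) (b : Int) (l : Int) : Decidable (Pre_imperfect_fib_rabbits n b l) := by unfold Pre_imperfect_fib_rabbits; infer_instance
def pvWitness_imperfect_fib_rabbits : Int × Int × Int := (6, 2, 3)

def Spec_imperfect_fib_rabbits (n : Int) (b : Int) (l : Int) (out : Int) : Prop := out = imperfect_fib_rabbits_alt n b l
instance (n : Int) (b : Int) (l : Int) (out : Int) : Decidable (Spec_imperfect_fib_rabbits n b l out) := by unfold Spec_imperfect_fib_rabbits; infer_instance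

-- ===== CLAIM (what is proved, stated in full; the proofs are below) =====
def Claim_equal_imperfect_fib_rabbits : Prop := ∀ (n : Int) (b : Int) (l : Int), Dom_imperfect_fib_rabbits n b l → Pre_imperfect_fib_rabbits n b l → Spec_imperfect_fib_rabbits n b l (imperfect_fib_rabbits n b l)

-- ===== LEMMAS AND PROOFS =====

lemma pv_foldl_mul_sum (b : Int) (xs : List Int) : ∀ c : Int,
    xs.foldl (fun acc x => acc + x * b) c = c + b * xs.sum := by
  induction xs with
  | nil => intro c; simp
  | cons x t ih => intro c; simp [List.foldl_cons, ih]; ring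

lemma pv_sum_loop (b : Int) (a : List Int) (l : Int) (hl : (a.length : Int) = l) :
    (PySem.List.pyRange 1 l 1).foldl (fun nb age => nb + (PySem.List.pyGetD a age 0) * b) 0
      = b * (a.drop 1).sum := by
  subst hl
  rw [PySem.List.foldl_pyRange_pyGetD' a 0 (fun acc x => acc + x * b) 0 (by norm_num)]
  simp [pv_foldl_mul_sum]

lemma pv_shift_elem (m : Nat) : ∀ (a : List Int), m < a.length → ∀ (j : Nat),
    ((PySem.List.pyRange (m : Int) 0 (-1)).foldl
      (fun r age => PySem.List.pySetD r age (PySem.List.pyGetD r (age - 1) 0)) a)[j]?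
      = if 1 ≤ j ∧ j ≤ m then a[j-1]? else a[j]? := by
  induction m with
  | zero =>
    intro a hm j
    rw [PySem.List.pyRange_neg_one_eq_nil (by norm_num)]
    simp only [List.foldl_nil]
    rw [if_neg (by omega)]
  | succ m ih =>
    intro a hm j
    have hc : (0:Int) < ((m+1:Nat) : Int) := by positivity
    rw [PySem.List.pyRange_neg_one_cons hc, List.foldl_cons]
    have hmi : ((m+1:Nat):Int) - 1 = ((m:Nat):Int) := by push_cast; ring
    have hset : PySem.List.pySetD a (((m+1:Nat)):Int) (PySem.List.pyGetD a ((m:Nat):Int) 0)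
        = a.set (m+1) (a[m]'(by omega)) := by
      rw [PySem.List.pyGetD_natCast, PySem.List.pySetD_natCast]
      congr 1
      exact List.getD_eq_getElem a 0 (by omega)
    rw [hmi, hset, ih _ (by simp; omega) j]
    by_cases h1 : 1 ≤ j ∧ j ≤ m
    · rw [if_pos h1, if_pos (by omega : 1 ≤ j ∧ j ≤ m + 1)]
      rw [List.getElem?_set]
      rw [if_neg (by omega : ¬ (m+1 = j - 1))]
    · by_cases h2 : j = m + 1
      · subst h2
        rw [if_neg h1, if_pos (by omega : 1 ≤ m+1 ∧ m+1 ≤ m + 1)]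
        rw [List.getElem?_set]
        simp [hm]
      · rw [if_neg h1, if_neg (by omega : ¬ (1 ≤ j ∧ j ≤ m + 1))]
        rw [List.getElem?_set]
        rw [if_neg (by omega : ¬ (m+1 = j))]

lemma pv_shift_loop (x : Int) (t : List Int) (l : Int) (hl : (((x :: t).length : Nat) : Int) = l) :
    (PySem.List.pyRange (l - 1) 0 (-1)).foldl
      (fun r age => PySem.List.pySetD r age (PySem.List.pyGetD r (age - 1) 0)) (x :: t)
      = x :: (x :: t).dropLast := by
  have hl1 : l - 1 = ((t.length : Nat) : Int) := by simp only [List.length_cons] at hl; omega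
  rw [hl1]
  apply List.ext_getElem?
  intro j
  rw [pv_shift_elem t.length (x :: t) (by simp) j]
  by_cases h1 : 1 ≤ j ∧ j ≤ t.length
  · rw [if_pos h1]
    rcases h1 with ⟨ha, hb⟩
    rw [show j = (j-1)+1 from by omega, List.getElem?_cons_succ]
    rw [List.getElem?_dropLast]
    rw [if_pos (by simp; omega)]
    congr 1
  · rw [if_neg h1]
    by_cases h0 : j = 0
    · subst h0; simp
    · have : t.length < j := by omega
      rw [List.getElem?_eq_none (by simp; omega), List.getElem?_eq_none (by simp [List.length_dropLast]; omega)]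

def pvInv (l : Int) (a : List Int) (born : List Int) (total : Int) : Prop :=
  l.toNat ≤ born.length ∧ a = (born.drop (born.length - l.toNat)).reverse ∧ total = a.sum

lemma pv_suffix_getLast? (born : List Int) (k : Nat) (hk : k < born.length) :
    born.getLast? = (born.drop k).getLast? := by
  conv_lhs => rw [← List.take_append_drop k born]
  rw [List.getLast?_append]
  cases hx : (born.drop k).getLast? with
  | none =>
    have := List.getLast?_eq_none_iff.mp hx
    have : (born.drop k).length = 0 := by rw [this]; rfl
    simp [List.length_drop] at this; omega
  | some v => rfl

lemma pv_step (l : Int) (hl : 1 ≤ l) (b : Int) (a born : List Int) (total : Int)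
    (h : pvInv l a born total) :
    pvInv l
      (PySem.List.pySetD
        ((PySem.List.pyRange (l - 1) 0 (-1)).foldl
          (fun r age => PySem.List.pySetD r age (PySem.List.pyGetD r (age - 1) 0)) a)
        0
        ((PySem.List.pyRange 1 l 1).foldl
          (fun nb age => nb + (PySem.List.pyGetD a age 0) * b) 0))
      (born ++ [b * (total - PySem.List.pyGetD born (-1) 0)])
      (total + (b * (total - PySem.List.pyGetD born (-1) 0) - PySem.List.pyGetD born (-l) 0)) := by
  obtain ⟨h1, h2, h3⟩ := h
  have hlT : 1 ≤ l.toNat := by omega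
  have hlcast : ((l.toNat : Nat) : Int) = l := Int.toNat_of_nonneg (by omega)
  have hblen : 1 ≤ born.length := by omega
  have hbne : born ≠ [] := by intro hnil; rw [hnil] at hblen; simp at hblen
  have hdlen : (born.drop (born.length - l.toNat)).length = l.toNat := by
    simp [List.length_drop]; omega
  have halen : a.length = l.toNat := by rw [h2]; simp [hdlen]
  have hane : a ≠ [] := by intro hnil; rw [hnil] at halen; simp at halen; omega
  -- born[-1] = head of a
  have hrev : born.drop (born.length - l.toNat) = a.reverse := by rw [h2, List.reverse_reverse]
  have hlast : PySem.List.pyGetD born (-1) 0 = a.head hane := by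
    rw [PySem.List.pyGetD_neg_one born 0 hbne]
    have h5 : born.getLast? = a.head? := by
      rw [pv_suffix_getLast? born (born.length - l.toNat) (by omega), hrev]
      simp
    rw [List.getLast?_eq_some_getLast hbne, List.head?_eq_some_head hane] at h5
    exact Option.some.inj h5
  -- born[-l] = last of a
  have hold : PySem.List.pyGetD born (-l) 0 = a.getLast hane := by
    rw [show (-l) = -((l.toNat : Nat) : Int) from by omega]
    rw [PySem.List.pyGetD_neg_natCast born l.toNat 0 (by omega) (by omega)]
    have h6 : born[born.length - l.toNat]? = a.getLast? := by
      rw [← List.head?_drop, hrev]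
      simp
    rw [List.getElem?_eq_getElem (by omega), List.getLast?_eq_some_getLast hane] at h6
    exact Option.some.inj h6
  -- newborns
  have hnb : (PySem.List.pyRange 1 l 1).foldl
      (fun nb age => nb + (PySem.List.pyGetD a age 0) * b) 0 = b * (a.drop 1).sum := by
    apply pv_sum_loop; rw [halen, hlcast]
  -- a as cons
  obtain ⟨x, t, hxt⟩ := List.exists_cons_of_ne_nil hane
  have hhead : a.head hane = x := by subst hxt; rfl
  -- the shift loop
  have hshift : (PySem.List.pyRange (l - 1) 0 (-1)).foldl
      (fun r age => PySem.List.pySetD r age (PySem.List.pyGetD r (age - 1) 0)) a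
      = x :: a.dropLast := by
    rw [hxt]
    exact pv_shift_loop x t l (by rw [← hxt, halen, hlcast])
  have hset0 : ∀ (ys : List Int) (v : Int), PySem.List.pySetD ys (0 : Int) v = ys.set 0 v := by
    intro ys v
    rw [show (0:Int) = ((0:Nat):Int) from rfl, PySem.List.pySetD_natCast]
  -- sums
  have hsum_split : a.sum = a.dropLast.sum + a.getLast hane := by
    conv_lhs => rw [← List.dropLast_append_getLast hane]
    simp
  have hdrop1 : (a.drop 1).sum = a.sum - x := by subst hxt; simp
  have htail : a.tail.sum = a.sum - x := by subst hxt; simp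
  refine ⟨by simp; omega, ?_, ?_⟩
  · -- list component
    rw [hshift, hset0, hnb, hlast, hhead]
    have hd : (born ++ [b * (total - x)]).drop ((born ++ [b * (total - x)]).length - l.toNat)
        = (a.reverse.tail) ++ [b * (total - x)] := by
      simp only [List.length_append, List.length_cons, List.length_nil]
      rw [List.drop_append_of_le_length (by simp; omega)]
      rw [show born.length + 1 - l.toNat = (born.length - l.toNat) + 1 from by omega]
      rw [← List.drop_drop, hrev, List.drop_one]
    rw [hd]
    rw [List.reverse_append, List.tail_reverse]
    simp [h3]
    exact Or.inl htail
  · -- sum component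
    rw [hshift, hset0, hnb, hlast, hhead, hold]
    have : (x :: a.dropLast).set 0 (b * (a.drop 1).sum) = b * (a.drop 1).sum :: a.dropLast := rfl
    rw [this]
    simp [h3, htail, List.sum_cons]
    linarith [hsum_split]

lemma pv_loop (l : Int) (hl : 1 ≤ l) (b : Int) (ms : List Int) :
    ∀ (a born : List Int) (total : Int), pvInv l a born total →
    pvInv l
      (ms.foldl (fun rba _month =>
        let new_borns := (PySem.List.pyRange 1 l 1).foldl
            (fun nb age => nb + (PySem.List.pyGetD rba age 0) * b) 0
        let rba := (PySem.List.pyRange (l - 1) 0 (-1)).foldl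
            (fun r age => PySem.List.pySetD r age (PySem.List.pyGetD r (age - 1) 0)) rba
        PySem.List.pySetD rba 0 new_borns) a)
      (ms.foldl (fun (st : List Int × Int) _month =>
        let nb := b * (st.2 - PySem.List.pyGetD st.1 (-1) 0)
        (st.1 ++ [nb], st.2 + (nb - PySem.List.pyGetD st.1 (-l) 0))) (born, total)).1
      (ms.foldl (fun (st : List Int × Int) _month =>
        let nb := b * (st.2 - PySem.List.pyGetD st.1 (-1) 0)
        (st.1 ++ [nb], st.2 + (nb - PySem.List.pyGetD st.1 (-l) 0))) (born, total)).2 := by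
  induction ms with
  | nil => intro a born total h; exact h
  | cons m ms ih =>
    intro a born total h
    simp only [List.foldl_cons]
    exact ih _ _ _ (pv_step l hl b a born total h)

lemma pv_init (l : Int) (hl : 1 ≤ l) :
    pvInv l (PySem.List.pySetD (List.replicate l.toNat 0) 0 1)
      (List.replicate (l - 1).toNat 0 ++ [1]) 1 := by
  have hlT : 1 ≤ l.toNat := by omega
  have hk : (l - 1).toNat = l.toNat - 1 := by omega
  have hrep : List.replicate l.toNat (0 : Int) = 0 :: List.replicate (l.toNat - 1) 0 := by
    rw [show l.toNat = (l.toNat - 1) + 1 from by omega]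
    rfl
  have ha : PySem.List.pySetD (List.replicate l.toNat (0:Int)) 0 1
      = 1 :: List.replicate (l.toNat - 1) 0 := by
    rw [show (0:Int) = ((0:Nat):Int) from rfl, PySem.List.pySetD_natCast]
    push_cast
    rw [hrep]
    rfl
  have hlen : (List.replicate (l - 1).toNat (0:Int) ++ [1]).length = l.toNat := by
    simp [hk]; omega
  refine ⟨by omega, ?_, ?_⟩
  · rw [ha, hlen]
    rw [Nat.sub_self, List.drop_zero, List.reverse_append, List.reverse_replicate, hk]
    rfl
  · rw [ha]
    simp

-- ===== VERDICT (by name: the statement is the Claim_ definition above) =====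
theorem imperfect_fib_rabbits_spec : Claim_equal_imperfect_fib_rabbits := by
  intro n b l _hdom hpre
  unfold Spec_imperfect_fib_rabbits imperfect_fib_rabbits imperfect_fib_rabbits_alt
  have hl : 1 ≤ l := hpre
  obtain ⟨-, -, h3⟩ := pv_loop l hl b (PySem.List.pyRange 0 n 1)
    (PySem.List.pySetD (List.replicate l.toNat 0) 0 1)
    (List.replicate (l - 1).toNat 0 ++ [1]) 1 (pv_init l hl)
  exact h3.symm
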